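-- pv_equiv track=rewrite | github.com/HIllya51/LunaTranslator | depracated/js2py/internals/prototypes/jsstring.py | replacement_template
-- ===== SOURCE A (Python) =====
-- DIGS = set(u'0123456789')
--
-- def replacement_template(rep, source, span, npar):
--     """Takes the replacement template and some info about the match and returns filled template
--        """
--     n = 0
--     res = ''
--     while n < len(rep) - 1:
--         char = rep[n]
--         if char == '$':
--             if rep[n + 1] == '$':
--                 res += '$'
--                 n += 2
--                 continue
--             elif rep[n + 1] == '`':
--                 # replace with string that is BEFORE match
--                 res += source[:span[0]]
--                 n += 2
--                 continue
--             elif rep[n + 1] == '\'':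
--                 # replace with string that is AFTER match
--                 res += source[span[1]:]
--                 n += 2
--                 continue
--             elif rep[n + 1] in DIGS:
--                 dig = rep[n + 1]
--                 if n + 2 < len(rep) and rep[n + 2] in DIGS:
--                     dig += rep[n + 2]
--                 num = int(dig)
--                 # we will not do any replacements if we dont have this npar or dig is 0
--                 if not num or num > len(npar):
--                     res += '$' + dig
--                 else:
--                     # None - undefined has to be replaced with ''
--                     res += npar[num - 1] if npar[num - 1] else ''
--                 n += 1 + len(dig)
--                 continue
--         res += char
--         n += 1
--     if n < len(rep):
--         res += rep[-1]
--     return res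
-- ===== SOURCE B (Python) =====
-- def replacement_template(rep, source, span, npar):
--     """Takes the replacement template and some info about the match and returns filled template
--        (split-based rewrite: cut rep on '$' and dispatch on the head of each following segment)"""
--     first, *rest = rep.split('$')
--     out = [first]
--     while rest:
--         p = rest.pop(0)
--         if p == '':
--             # the '$' was followed by another '$' (next segment is literal) or ended the string
--             out.append('$')
--             if rest:
--                 out.append(rest.pop(0))
--         elif p[0] == '`':
--             out.append(source[:span[0]])
--             out.append(p[1:])
--         elif p[0] == '\'':
--             out.append(source[span[1]:])
--             out.append(p[1:])
--         elif p[0].isdigit():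
--             k = 2 if len(p) > 1 and p[1].isdigit() else 1
--             dig = p[:k]
--             num = int(dig)
--             if not num or num > len(npar):
--                 out.append('$' + dig)
--             else:
--                 out.append(npar[num - 1] if npar[num - 1] else '')
--             out.append(p[k:])
--         else:
--             out.append('$')
--             out.append(p)
--     return ''.join(out)
-- ===== Notes on version B (the rewrite author's own statement) =====
-- stated objective: alternative
-- what changed: B replaces A's index-driven while loop (manual n/n+1/n+2 bookkeeping and a special trailing-character step) by splitting the template on '$' once and dispatching on the head character of each following segment.
import Mathlib
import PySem

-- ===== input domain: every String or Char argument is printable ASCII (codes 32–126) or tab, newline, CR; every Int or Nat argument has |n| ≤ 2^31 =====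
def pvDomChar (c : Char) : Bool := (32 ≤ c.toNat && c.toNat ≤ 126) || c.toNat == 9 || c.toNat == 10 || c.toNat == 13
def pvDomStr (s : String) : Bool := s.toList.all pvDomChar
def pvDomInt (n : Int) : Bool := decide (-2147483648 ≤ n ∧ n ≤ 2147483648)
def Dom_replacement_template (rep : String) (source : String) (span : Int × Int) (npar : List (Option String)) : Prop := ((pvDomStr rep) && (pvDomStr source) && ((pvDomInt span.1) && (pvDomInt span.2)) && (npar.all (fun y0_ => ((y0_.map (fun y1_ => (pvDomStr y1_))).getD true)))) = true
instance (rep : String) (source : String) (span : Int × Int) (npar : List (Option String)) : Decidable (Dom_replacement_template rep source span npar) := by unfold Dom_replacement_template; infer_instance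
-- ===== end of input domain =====

-- B replaces A's index-driven while loop by splitting the template on '$' once and
-- dispatching on the head of each following segment (objective: alternative decomposition, same cost).

-- ===== PORT A =====
-- DIGS = set('0123456789')
def pvDIGS : PySem.Set Char := PySem.Set.ofList "0123456789".toList

-- the 'while n < len(rep) - 1' loop of A, state (n, res); n is a Nat since it starts at 0 and only grows
def pvALoop (r src : List Char) (sp : Int × Int) (npar : List (Option String)) (n : Nat) (res : List Char) : List Char :=
  if h : n + 1 < r.length then
    -- char = rep[n]
    if PySem.List.pyGetD r (n : Int) ' ' = '$' then
      if PySem.List.pyGetD r ((n : Int) + 1) ' ' = '$' then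
        pvALoop r src sp npar (n + 2) (res ++ ['$'])
      else if PySem.List.pyGetD r ((n : Int) + 1) ' ' = '`' then
        pvALoop r src sp npar (n + 2) (res ++ PySem.List.slice src none (some sp.1))
      else if PySem.List.pyGetD r ((n : Int) + 1) ' ' = '\'' then
        pvALoop r src sp npar (n + 2) (res ++ PySem.List.slice src (some sp.2) none)
      else if PySem.Set.contains pvDIGS (PySem.List.pyGetD r ((n : Int) + 1) ' ') then
        let dig : List Char :=
          if n + 2 < r.length then
            if PySem.Set.contains pvDIGS (PySem.List.pyGetD r ((n : Int) + 2) ' ') then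
              [PySem.List.pyGetD r ((n : Int) + 1) ' ', PySem.List.pyGetD r ((n : Int) + 2) ' ']
            else [PySem.List.pyGetD r ((n : Int) + 1) ' ']
          else [PySem.List.pyGetD r ((n : Int) + 1) ' ']
        let num : Int := (PySem.Int.ofChars? dig).getD 0
        let piece : List Char :=
          if num = 0 ∨ (npar.length : Int) < num then '$' :: dig
          else match PySem.List.pyGetD npar (num - 1) none with
               | none => []
               | some s => if s.toList = [] then [] else s.toList
        pvALoop r src sp npar (n + 1 + dig.length) (res ++ piece)
      else pvALoop r src sp npar (n + 1) (res ++ [PySem.List.pyGetD r (n : Int) ' '])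
    else pvALoop r src sp npar (n + 1) (res ++ [PySem.List.pyGetD r (n : Int) ' '])
  else if n < r.length then
    res ++ [PySem.List.pyGetD r (-1) ' ']   -- res += rep[-1]
  else res
termination_by r.length - n
decreasing_by all_goals omega

def replacement_template (rep : String) (source : String) (span : Int × Int) (npar : List (Option String)) : String :=
  String.ofList (pvALoop rep.toList source.toList span npar 0 [])

-- ===== PORT B =====
-- the 'while rest: p = rest.pop(0)' loop of B; the returned list is the concatenation ''.join(out)
def pvBLoop (src : List Char) (sp : Int × Int) (npar : List (Option String)) : List (List Char) → List Char
  | [] => []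
  | p :: rest =>
    match p, rest with
    | [], [] => ['$']
    | [], q :: rest' => '$' :: (q ++ pvBLoop src sp npar rest')
    | c :: tl, rest =>
      if c = '`' then PySem.List.slice src none (some sp.1) ++ tl ++ pvBLoop src sp npar rest
      else if c = '\'' then PySem.List.slice src (some sp.2) none ++ tl ++ pvBLoop src sp npar rest
      else if PySem.Chars.isdigit c then
        -- k = 2 if len(p) > 1 and p[1].isdigit() else 1 ; dig = p[:k] ; p[k:] is dt.2
        let dt : List Char × List Char :=
          match tl with
          | e :: tl' => if PySem.Chars.isdigit e then ([c, e], tl') else ([c], e :: tl')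
          | [] => ([c], [])
        let num : Int := (PySem.Int.ofChars? dt.1).getD 0
        (if num = 0 ∨ (npar.length : Int) < num then '$' :: dt.1
         else match PySem.List.pyGetD npar (num - 1) none with
              | none => []
              | some s => if s.toList = [] then [] else s.toList) ++ dt.2 ++ pvBLoop src sp npar rest
      else '$' :: (c :: tl) ++ pvBLoop src sp npar rest

def replacement_template_alt (rep : String) (source : String) (span : Int × Int) (npar : List (Option String)) : String :=
  match PySem.Chars.splitOn rep.toList "$".toList with
  | [] => String.ofList []   -- unreachable: split never returns an empty list
  | first :: rest => String.ofList (first ++ pvBLoop source.toList span npar rest)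

-- ===== PRECONDITION & SPEC =====
def Spec_replacement_template (rep : String) (source : String) (span : Int × Int) (npar : List (Option String)) (out : String) : Prop := out = replacement_template_alt rep source span npar
instance (rep : String) (source : String) (span : Int × Int) (npar : List (Option String)) (out : String) : Decidable (Spec_replacement_template rep source span npar out) := by unfold Spec_replacement_template; infer_instance

-- ===== CLAIM (what is proved, stated in full; the proofs are below) =====
def Claim_equal_replacement_template : Prop := ∀ (rep : String) (source : String) (span : Int × Int) (npar : List (Option String)), Dom_replacement_template rep source span npar → Spec_replacement_template rep source span npar (replacement_template rep source span npar)

-- ===== LEMMAS AND PROOFS =====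

-- structural split of a char list on '$' (what rep.split('$') computes)
def pvSplit : List Char → List (List Char)
  | [] => [[]]
  | c :: tl =>
    if c = '$' then [] :: pvSplit tl
    else match pvSplit tl with
         | [] => [[c]]
         | q :: qs => (c :: q) :: qs

lemma pvSplit_ne_nil (l : List Char) : pvSplit l ≠ [] := by
  cases l with
  | nil => simp [pvSplit]
  | cons c tl =>
    simp only [pvSplit]
    split
    · simp
    · split <;> simp

lemma go_eq (fuel : Nat) (l cur : List Char) (acc : List (List Char)) (h : l.length < fuel) :
    PySem.Chars.splitOn.go ['$'] fuel l cur acc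
      = acc.reverse ++ (pvSplit l).modifyHead (cur.reverse ++ ·) := by
  induction fuel generalizing l cur acc with
  | zero => omega
  | succ f ih =>
    cases l with
    | nil => simp [PySem.Chars.splitOn.go, pvSplit]
    | cons c tl =>
      rw [PySem.Chars.splitOn.go]
      by_cases hc : c = '$'
      · subst hc
        have hp : List.isPrefixOf ['$'] ('$' :: tl) = true := by simp [List.isPrefixOf]
        simp only [hp, if_pos, List.length_singleton, List.drop_succ_cons, List.drop_zero]
        rw [ih tl [] (List.reverse cur :: acc) (by simp at h ⊢; omega)]
        simp [pvSplit]
        cases pvSplit tl <;> simp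
      · have hp : List.isPrefixOf ['$'] (c :: tl) = false := by
          simp [List.isPrefixOf]; exact fun hh => hc hh.symm
        simp only [hp, Bool.false_eq_true, if_neg, not_false_iff]
        rw [ih tl (c :: cur) acc (by simp at h ⊢; omega)]
        simp only [pvSplit, if_neg hc]
        cases hq : pvSplit tl with
        | nil => exact absurd hq (pvSplit_ne_nil tl)
        | cons q qs => simp [List.modifyHead]

lemma splitOn_eq_pvSplit (l : List Char) : PySem.Chars.splitOn l ['$'] = pvSplit l := by
  rw [PySem.Chars.splitOn, go_eq _ _ _ _ (by omega)]
  simp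
  cases hq : pvSplit l with
  | nil => exact absurd hq (pvSplit_ne_nil l)
  | cons q qs => simp [List.modifyHead]

lemma digs_eq_isdigit (c : Char) : PySem.Set.contains pvDIGS c = PySem.Chars.isdigit c := by
  have h : pvDIGS = ['0','1','2','3','4','5','6','7','8','9'] := by decide
  simp only [h, PySem.Set.contains, PySem.Chars.isdigit, List.contains_eq_mem, List.mem_cons,
    List.not_mem_nil, or_false, Char.le_def, Char.ext_iff, UInt32.ext_iff, UInt32.le_iff_toNat_le]
  rcases c with ⟨⟨⟨v, hv⟩⟩, hval⟩
  simp only [← Bool.decide_and, decide_eq_decide]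
  show (v = 48 ∨ v = 49 ∨ v = 50 ∨ v = 51 ∨ v = 52 ∨ v = 53 ∨ v = 54 ∨ v = 55 ∨ v = 56 ∨ v = 57) ↔ (48 ≤ v ∧ v ≤ 57)
  omega

-- the value A appends for a '$<dig>' token
def pvPiece (npar : List (Option String)) (dig : List Char) : List Char :=
  let num : Int := (PySem.Int.ofChars? dig).getD 0
  if num = 0 ∨ (npar.length : Int) < num then '$' :: dig
  else match PySem.List.pyGetD npar (num - 1) none with
       | none => []
       | some s => if s.toList = [] then [] else s.toList

-- A's loop re-stated as a structural recursion on the remaining suffix of rep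
def pvGo (src : List Char) (sp : Int × Int) (npar : List (Option String)) : List Char → List Char
  | [] => []
  | c :: rest =>
    if c = '$' then
      match rest with
      | [] => ['$']
      | c2 :: tl =>
        if c2 = '$' then '$' :: pvGo src sp npar tl
        else if c2 = '`' then PySem.List.slice src none (some sp.1) ++ pvGo src sp npar tl
        else if c2 = '\'' then PySem.List.slice src (some sp.2) none ++ pvGo src sp npar tl
        else if PySem.Set.contains pvDIGS c2 then
          match tl with
          | c3 :: tl' =>
            if PySem.Set.contains pvDIGS c3 then pvPiece npar [c2, c3] ++ pvGo src sp npar tl'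
            else pvPiece npar [c2] ++ pvGo src sp npar (c3 :: tl')
          | [] => pvPiece npar [c2] ++ pvGo src sp npar []
        else '$' :: pvGo src sp npar (c2 :: tl)
    else c :: pvGo src sp npar rest
termination_by l => l.length
decreasing_by all_goals (simp only [List.length_cons]; omega)

lemma pvGetD_nat (r : List Char) (a : Nat) (h : a < r.length) :
    PySem.List.pyGetD r (a : Int) ' ' = r[a] := by
  rw [PySem.List.pyGetD_natCast, List.getD_eq_getElem]
lemma pvGetD_nat1 (r : List Char) (a : Nat) (h : a + 1 < r.length) :
    PySem.List.pyGetD r ((a : Int) + 1) ' ' = r[a + 1] := by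
  have : ((a : Int) + 1) = ((a + 1 : Nat) : Int) := by push_cast; ring
  rw [this, pvGetD_nat _ _ h]
lemma pvGetD_nat2 (r : List Char) (a : Nat) (h : a + 2 < r.length) :
    PySem.List.pyGetD r ((a : Int) + 2) ' ' = r[a + 2] := by
  have : ((a : Int) + 2) = ((a + 2 : Nat) : Int) := by push_cast; ring
  rw [this, pvGetD_nat _ _ h]
lemma pvDrop2 (r : List Char) (a : Nat) (h : a + 1 < r.length) :
    List.drop a r = r[a] :: r[a+1] :: List.drop (a+2) r := by
  rw [List.drop_eq_getElem_cons (by omega), List.drop_eq_getElem_cons (by omega)]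

lemma pvGo_nil (src : List Char) (sp : Int × Int) (npar : List (Option String)) :
    pvGo src sp npar [] = [] := by
  rw [pvGo.eq_def]

lemma pvGo_singleton (src : List Char) (sp : Int × Int) (npar : List (Option String)) (c : Char) :
    pvGo src sp npar [c] = [c] := by
  rw [pvGo.eq_def]
  split
  · simp_all
  · split <;> simp_all [pvGo_nil]

lemma pvDig_ne (c : Char) (h : PySem.Set.contains pvDIGS c = true) :
    c ≠ '$' ∧ c ≠ '`' ∧ c ≠ '\'' := by
  have hm : c ∈ (['0','1','2','3','4','5','6','7','8','9'] : List Char) := by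
    have hd : pvDIGS = ['0','1','2','3','4','5','6','7','8','9'] := by decide
    simpa [PySem.Set.contains, hd] using h
  fin_cases hm <;> decide

lemma pvGo_dollar_dollar (src : List Char) (sp : Int × Int) (npar : List (Option String)) (tl : List Char) :
    pvGo src sp npar ('$' :: '$' :: tl) = '$' :: pvGo src sp npar tl := by
  rw [pvGo.eq_def]; simp

lemma pvGo_backtick (src : List Char) (sp : Int × Int) (npar : List (Option String)) (tl : List Char) :
    pvGo src sp npar ('$' :: '`' :: tl) = PySem.List.slice src none (some sp.1) ++ pvGo src sp npar tl := by
  rw [pvGo.eq_def]; simp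

lemma pvGo_quote (src : List Char) (sp : Int × Int) (npar : List (Option String)) (tl : List Char) :
    pvGo src sp npar ('$' :: '\'' :: tl) = PySem.List.slice src (some sp.2) none ++ pvGo src sp npar tl := by
  rw [pvGo.eq_def]; simp

lemma pvGo_dig_two (src : List Char) (sp : Int × Int) (npar : List (Option String)) (c2 c3 : Char) (tl' : List Char)
    (h2 : PySem.Set.contains pvDIGS c2 = true) (h3 : PySem.Set.contains pvDIGS c3 = true) :
    pvGo src sp npar ('$' :: c2 :: c3 :: tl') = pvPiece npar [c2, c3] ++ pvGo src sp npar tl' := by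
  obtain ⟨hne1, hne2, hne3⟩ := pvDig_ne c2 h2
  have h2' : c2 ∈ pvDIGS := by simpa using h2
  have h3' : c3 ∈ pvDIGS := by simpa using h3
  rw [pvGo.eq_def]; simp [hne1, hne2, hne3, h2', h3']

lemma pvGo_dig_one_cons (src : List Char) (sp : Int × Int) (npar : List (Option String)) (c2 c3 : Char) (tl' : List Char)
    (h2 : PySem.Set.contains pvDIGS c2 = true) (h3 : ¬ PySem.Set.contains pvDIGS c3 = true) :
    pvGo src sp npar ('$' :: c2 :: c3 :: tl') = pvPiece npar [c2] ++ pvGo src sp npar (c3 :: tl') := by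
  obtain ⟨hne1, hne2, hne3⟩ := pvDig_ne c2 h2
  have h2' : c2 ∈ pvDIGS := by simpa using h2
  have h3' : c3 ∉ pvDIGS := by simpa using h3
  rw [pvGo.eq_def]; simp [hne1, hne2, hne3, h2', h3']

lemma pvGo_dig_one_nil (src : List Char) (sp : Int × Int) (npar : List (Option String)) (c2 : Char)
    (h2 : PySem.Set.contains pvDIGS c2 = true) :
    pvGo src sp npar ['$', c2] = pvPiece npar [c2] ++ pvGo src sp npar [] := by
  obtain ⟨hne1, hne2, hne3⟩ := pvDig_ne c2 h2
  have h2' : c2 ∈ pvDIGS := by simpa using h2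
  rw [pvGo.eq_def]; simp [hne1, hne2, hne3, h2']

lemma pvGo_other (src : List Char) (sp : Int × Int) (npar : List (Option String)) (c2 : Char) (tl : List Char)
    (h1 : c2 ≠ '$') (h2 : c2 ≠ '`') (h3 : c2 ≠ '\'') (h4 : ¬ PySem.Set.contains pvDIGS c2 = true) :
    pvGo src sp npar ('$' :: c2 :: tl) = '$' :: pvGo src sp npar (c2 :: tl) := by
  have h4' : c2 ∉ pvDIGS := by simpa using h4
  rw [pvGo.eq_def]; simp [h1, h2, h3, h4']

lemma pvGo_nondollar (src : List Char) (sp : Int × Int) (npar : List (Option String)) (c : Char) (rest : List Char)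
    (h : c ≠ '$') :
    pvGo src sp npar (c :: rest) = c :: pvGo src sp npar rest := by
  rw [pvGo.eq_def]; simp [h]

lemma pvALoop_eq_go (r src : List Char) (sp : Int × Int) (npar : List (Option String)) (n : Nat) (res : List Char) :
    pvALoop r src sp npar n res = res ++ pvGo src sp npar (r.drop n) := by
  induction n, res using pvALoop.induct r src sp npar with
  | case1 n res hlt hchar hdollar ih =>
    rw [pvALoop.eq_def, dif_pos hlt]
    rw [pvGetD_nat r n (by omega)] at hchar
    rw [pvGetD_nat1 r n hlt] at hdollar
    rw [pvGetD_nat r n (by omega), pvGetD_nat1 r n hlt, if_pos hchar, if_pos hdollar, ih,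
        pvDrop2 r n hlt, hchar, hdollar, pvGo_dollar_dollar]
    simp
  | case2 n res hlt hchar hn1 hbt ih =>
    rw [pvGetD_nat r n (by omega)] at hchar
    rw [pvGetD_nat1 r n hlt] at hn1 hbt
    rw [pvALoop.eq_def, dif_pos hlt, pvGetD_nat r n (by omega), pvGetD_nat1 r n hlt,
        if_pos hchar, if_neg hn1, if_pos hbt, ih, pvDrop2 r n hlt, hchar, hbt, pvGo_backtick]
    simp
  | case3 n res hlt hchar hn1 hn2 hqt ih =>
    rw [pvGetD_nat r n (by omega)] at hchar
    rw [pvGetD_nat1 r n hlt] at hn1 hn2 hqt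
    rw [pvALoop.eq_def, dif_pos hlt, pvGetD_nat r n (by omega), pvGetD_nat1 r n hlt,
        if_pos hchar, if_neg hn1, if_neg hn2, if_pos hqt, ih, pvDrop2 r n hlt, hchar, hqt, pvGo_quote]
    simp
  | case4 n res hlt hchar hn1 hn2 hn3 hdig dig num piece ih =>
    rw [pvGetD_nat r n (by omega)] at hchar
    rw [pvGetD_nat1 r n hlt] at hn1 hn2 hn3 hdig
    simp only [piece, num, dig] at ih
    simp only [dite_eq_ite] at ih
    rw [pvGetD_nat1 r n hlt] at ih
    rw [pvALoop.eq_def, dif_pos hlt, pvGetD_nat r n (by omega), pvGetD_nat1 r n hlt,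
        if_pos hchar, if_neg hn1, if_neg hn2, if_neg hn3, if_pos hdig]
    by_cases h2 : n + 2 < r.length
    · rw [if_pos h2] at ih
      rw [if_pos h2]
      rw [pvGetD_nat2 r n h2] at ih ⊢
      by_cases h3 : pvDIGS.contains r[n+2] = true
      · rw [if_pos h3] at ih
        rw [if_pos h3]
        simp only [List.length_cons, List.length_nil] at ih ⊢
        rw [ih, pvDrop2 r n hlt, hchar,
            List.drop_eq_getElem_cons (show n + 2 < r.length from h2),
            pvGo_dig_two src sp npar _ _ _ hdig h3, pvPiece]
        have e : n + 1 + (0 + 1 + 1) = n + 2 + 1 := by omega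
        rw [e]
        simp
      · rw [if_neg h3] at ih
        rw [if_neg h3]
        simp only [List.length_cons, List.length_nil] at ih ⊢
        rw [ih, pvDrop2 r n hlt, hchar,
            List.drop_eq_getElem_cons (show n + 2 < r.length from h2),
            pvGo_dig_one_cons src sp npar _ _ _ hdig h3, pvPiece,
            ← List.drop_eq_getElem_cons (show n + 2 < r.length from h2)]
        simp
    · rw [if_neg h2] at ih
      rw [if_neg h2]
      simp only [List.length_cons, List.length_nil] at ih ⊢
      have hd2 : List.drop (n+2) r = [] := List.drop_eq_nil_of_le (by omega)
      have e : n + 1 + (0 + 1) = n + 2 := by omega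
      rw [ih, e, pvDrop2 r n hlt, hchar, hd2, pvGo_dig_one_nil src sp npar _ hdig, pvPiece, pvGo_nil]
      simp
  | case5 n res hlt hchar hn1 hn2 hn3 hnd ih =>
    rw [pvGetD_nat r n (by omega)] at hchar
    rw [pvGetD_nat r n (by omega)] at ih
    rw [pvGetD_nat1 r n hlt] at hn1 hn2 hn3 hnd
    rw [pvALoop.eq_def, dif_pos hlt, pvGetD_nat r n (by omega), pvGetD_nat1 r n hlt,
        if_pos hchar, if_neg hn1, if_neg hn2, if_neg hn3, if_neg hnd, ih, pvDrop2 r n hlt, hchar,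
        pvGo_other src sp npar _ _ hn1 hn2 hn3 hnd]
    rw [← List.drop_eq_getElem_cons (show n + 1 < r.length by omega)]
    simp
  | case6 n res hlt hchar ih =>
    rw [pvGetD_nat r n (by omega)] at hchar
    rw [pvGetD_nat r n (by omega)] at ih
    rw [pvALoop.eq_def, dif_pos hlt, pvGetD_nat r n (by omega), if_neg hchar, ih,
        List.drop_eq_getElem_cons (show n < r.length by omega),
        pvGo_nondollar src sp npar _ _ hchar]
    simp
  | case7 n res hge hlt =>
    rw [pvALoop.eq_def, dif_neg hge, if_pos hlt]
    have hr : r ≠ [] := by intro hh; subst hh; simp at hlt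
    rw [PySem.List.pyGetD_neg_one (xs := r) (d := ' ') hr,
        List.drop_eq_getElem_cons (show n < r.length by omega),
        List.drop_eq_nil_of_le (by omega), pvGo_singleton, List.getLast_eq_getElem]
    have hidx : r.length - 1 = n := by omega
    congr 2
    simp [hidx]
  | case8 n res h1 h2 =>
    rw [pvALoop.eq_def, dif_neg h1, if_neg h2, List.drop_eq_nil_of_le (by omega), pvGo_nil]
    simp

lemma pvB_nil (src : List Char) (sp : Int × Int) (npar : List (Option String)) :
    pvBLoop src sp npar [] = [] := rfl
lemma pvB_emp1 (src : List Char) (sp : Int × Int) (npar : List (Option String)) :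
    pvBLoop src sp npar [[]] = ['$'] := rfl
lemma pvB_emp (src : List Char) (sp : Int × Int) (npar : List (Option String)) (q : List Char) (rest : List (List Char)) :
    pvBLoop src sp npar ([] :: q :: rest) = '$' :: (q ++ pvBLoop src sp npar rest) := rfl
lemma pvB_bt (src : List Char) (sp : Int × Int) (npar : List (Option String)) (tl : List Char) (rest : List (List Char)) :
    pvBLoop src sp npar (('`' :: tl) :: rest) = PySem.List.slice src none (some sp.1) ++ tl ++ pvBLoop src sp npar rest := rfl
lemma pvB_qt (src : List Char) (sp : Int × Int) (npar : List (Option String)) (tl : List Char) (rest : List (List Char)) :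
    pvBLoop src sp npar (('\'' :: tl) :: rest) = PySem.List.slice src (some sp.2) none ++ tl ++ pvBLoop src sp npar rest := rfl
lemma pvB_dig2 (src : List Char) (sp : Int × Int) (npar : List (Option String)) (c e : Char) (tlp : List Char) (rest : List (List Char))
    (h1 : c ≠ '`') (h2 : c ≠ '\'') (h3 : PySem.Chars.isdigit c = true) (h4 : PySem.Chars.isdigit e = true) :
    pvBLoop src sp npar ((c :: e :: tlp) :: rest) = pvPiece npar [c, e] ++ (tlp ++ pvBLoop src sp npar rest) := by
  rw [pvBLoop.eq_def]
  simp [h1, h2, h3, h4, pvPiece]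
lemma pvB_dig1_cons (src : List Char) (sp : Int × Int) (npar : List (Option String)) (c e : Char) (tlp : List Char) (rest : List (List Char))
    (h1 : c ≠ '`') (h2 : c ≠ '\'') (h3 : PySem.Chars.isdigit c = true) (h4 : ¬ PySem.Chars.isdigit e = true) :
    pvBLoop src sp npar ((c :: e :: tlp) :: rest) = pvPiece npar [c] ++ ((e :: tlp) ++ pvBLoop src sp npar rest) := by
  rw [pvBLoop.eq_def]
  simp [h1, h2, h3, h4, pvPiece]
lemma pvB_dig1_nil (src : List Char) (sp : Int × Int) (npar : List (Option String)) (c : Char) (rest : List (List Char))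
    (h1 : c ≠ '`') (h2 : c ≠ '\'') (h3 : PySem.Chars.isdigit c = true) :
    pvBLoop src sp npar ([c] :: rest) = pvPiece npar [c] ++ pvBLoop src sp npar rest := by
  rw [pvBLoop.eq_def]
  simp [h1, h2, h3, pvPiece]
lemma pvB_other (src : List Char) (sp : Int × Int) (npar : List (Option String)) (c : Char) (tl : List Char) (rest : List (List Char))
    (h1 : c ≠ '`') (h2 : c ≠ '\'') (h3 : ¬ PySem.Chars.isdigit c = true) :
    pvBLoop src sp npar ((c :: tl) :: rest) = '$' :: (c :: tl) ++ pvBLoop src sp npar rest := by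
  rw [pvBLoop.eq_def]
  simp [h1, h2, h3]

lemma pvGo_eq_split (src : List Char) (sp : Int × Int) (npar : List (Option String)) (l : List Char) :
    pvGo src sp npar l =
      (match pvSplit l with
       | [] => []
       | f :: rs => f ++ pvBLoop src sp npar rs) := by
  induction l using pvGo.induct with
  | case1 => rw [pvGo_nil]; simp [pvSplit, pvB_nil]
  | case2 => rw [pvGo_singleton]; simp [pvSplit, pvB_emp1]
  | case3 tl ih =>
    cases hq : pvSplit tl with
    | nil => exact absurd hq (pvSplit_ne_nil tl)
    | cons q qs =>
      rw [hq] at ih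
      have hs : pvSplit ('$' :: '$' :: tl) = [] :: [] :: q :: qs := by simp [pvSplit, hq]
      rw [pvGo_dollar_dollar, ih, hs]
      simp [pvB_emp]
  | case4 tl _ ih =>
    cases hq : pvSplit tl with
    | nil => exact absurd hq (pvSplit_ne_nil tl)
    | cons q qs =>
      rw [hq] at ih
      have hs : pvSplit ('$' :: '`' :: tl) = [] :: ('`' :: q) :: qs := by simp [pvSplit, hq]
      rw [pvGo_backtick, ih, hs]
      simp [pvB_bt]
  | case5 tl _ _ ih =>
    cases hq : pvSplit tl with
    | nil => exact absurd hq (pvSplit_ne_nil tl)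
    | cons q qs =>
      rw [hq] at ih
      have hs : pvSplit ('$' :: '\'' :: tl) = [] :: ('\'' :: q) :: qs := by simp [pvSplit, hq]
      rw [pvGo_quote, ih, hs]
      simp [pvB_qt]
  | case6 c hne1 hne2 hne3 hdc e tl' hde ih =>
    obtain ⟨he1, _, _⟩ := pvDig_ne e hde
    have hdc' : PySem.Chars.isdigit c = true := by rw [← digs_eq_isdigit]; exact hdc
    have hde' : PySem.Chars.isdigit e = true := by rw [← digs_eq_isdigit]; exact hde
    cases hq : pvSplit tl' with
    | nil => exact absurd hq (pvSplit_ne_nil tl')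
    | cons q qs =>
      rw [hq] at ih
      have hs : pvSplit ('$' :: c :: e :: tl') = [] :: (c :: e :: q) :: qs := by
        simp [pvSplit, hq, hne1, he1]
      rw [pvGo_dig_two src sp npar _ _ _ hdc hde, ih, hs]
      simp [pvB_dig2 src sp npar c e q qs hne2 hne3 hdc' hde']
  | case7 c hne1 hne2 hne3 hdc e tl' hde ih =>
    have hdc' : PySem.Chars.isdigit c = true := by rw [← digs_eq_isdigit]; exact hdc
    have hde' : ¬ PySem.Chars.isdigit e = true := by rw [← digs_eq_isdigit]; exact hde
    by_cases he : e = '$'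
    · subst he
      cases hq : pvSplit tl' with
      | nil => exact absurd hq (pvSplit_ne_nil tl')
      | cons q qs =>
        have hs2 : pvSplit ('$' :: tl') = [] :: q :: qs := by simp [pvSplit, hq]
        rw [hs2] at ih
        have hs : pvSplit ('$' :: c :: '$' :: tl') = [] :: [c] :: q :: qs := by
          simp [pvSplit, hq, hne1]
        rw [pvGo_dig_one_cons src sp npar _ _ _ hdc hde, ih, hs]
        simp [pvB_dig1_nil src sp npar c (q :: qs) hne2 hne3 hdc']
    · cases hq : pvSplit tl' with
      | nil => exact absurd hq (pvSplit_ne_nil tl')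
      | cons q qs =>
        have hs2 : pvSplit (e :: tl') = (e :: q) :: qs := by simp [pvSplit, hq, he]
        rw [hs2] at ih
        have hs : pvSplit ('$' :: c :: e :: tl') = [] :: (c :: e :: q) :: qs := by
          simp [pvSplit, hq, hne1, he]
        rw [pvGo_dig_one_cons src sp npar _ _ _ hdc hde, ih, hs]
        simp [pvB_dig1_cons src sp npar c e q qs hne2 hne3 hdc' hde']
  | case8 c hne1 hne2 hne3 hdc ih =>
    have hdc' : PySem.Chars.isdigit c = true := by rw [← digs_eq_isdigit]; exact hdc
    have hs : pvSplit ['$', c] = [[], [c]] := by simp [pvSplit, hne1]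
    rw [pvGo_dig_one_nil src sp npar _ hdc, pvGo_nil, hs]
    simp [pvB_dig1_nil src sp npar c [] hne2 hne3 hdc', pvB_nil]
  | case9 c tl hne1 hne2 hne3 hnd ih =>
    have hnd' : ¬ PySem.Chars.isdigit c = true := by rw [← digs_eq_isdigit]; exact hnd
    cases hq : pvSplit tl with
    | nil => exact absurd hq (pvSplit_ne_nil tl)
    | cons q qs =>
      have hs2 : pvSplit (c :: tl) = (c :: q) :: qs := by simp [pvSplit, hq, hne1]
      rw [hs2] at ih
      have hs : pvSplit ('$' :: c :: tl) = [] :: (c :: q) :: qs := by simp [pvSplit, hq, hne1]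
      rw [pvGo_other src sp npar _ _ hne1 hne2 hne3 hnd, ih, hs]
      simp [pvB_other src sp npar c q qs hne2 hne3 hnd']
  | case10 c tl hne ih =>
    cases hq : pvSplit tl with
    | nil => exact absurd hq (pvSplit_ne_nil tl)
    | cons q qs =>
      rw [hq] at ih
      have hs : pvSplit (c :: tl) = (c :: q) :: qs := by simp [pvSplit, hq, hne]
      rw [pvGo_nondollar src sp npar _ _ hne, ih, hs]
      simp

-- ===== VERDICT (by name: the statement is the Claim_ definition above) =====
theorem replacement_template_spec : Claim_equal_replacement_template := by
  intro rep source span npar _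
  unfold Spec_replacement_template replacement_template replacement_template_alt
  rw [pvALoop_eq_go, List.drop_zero, pvGo_eq_split]
  have hsp : ("$" : String).toList = ['$'] := rfl
  rw [hsp, splitOn_eq_pvSplit]
  cases h : pvSplit rep.toList with
  | nil => exact absurd h (pvSplit_ne_nil _)
  | cons f rs => simp
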